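-- pv_equiv track=rewrite | github.com/lkhrup/PXX | main.py | split_blocks_indentation
-- ===== SOURCE A (Python) =====
-- def split_blocks_indentation(lines):
--     blocks = []
--     block = []
--     for line in lines:
--         if line and line[0] != ' ':  # New block
--             if block:
--                 blocks.append('\n'.join(block))
--             block = [line]
--         else:
--             block.append(line)
--     if block:
--         blocks.append('\n'.join(block))
--     return blocks
-- ===== SOURCE B (Python) =====
-- def split_blocks_indentation(lines):
--     # Index-jumping scan: for each block start i, an inner while advances n to
--     # the index of the next header line (non-empty, first char not a space);
--     # the block is the slice lines[i:n] joined, and i jumps to n.  No per-line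
--     # accumulator; blocks are cut out of the list directly.
--     blocks = []
--     i = 0
--     while i < len(lines):
--         n = i + 1
--         while n < len(lines) and not (lines[n] and lines[n][0] != ' '):
--             n += 1
--         blocks.append('\n'.join(lines[i:n]))
--         i = n
--     return blocks
-- ===== Notes on version B (the rewrite author's own statement) =====
-- stated objective: alternative
-- what changed: Replaces A's per-line accumulator loop (flush the pending block when the next header arrives, and once more after the loop) by an index-jumping two-level scan: an inner while finds the index of the next header line and the block is taken as the slice lines[i:n] in one step, so no per-line block list is maintained.
import Mathlib
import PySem

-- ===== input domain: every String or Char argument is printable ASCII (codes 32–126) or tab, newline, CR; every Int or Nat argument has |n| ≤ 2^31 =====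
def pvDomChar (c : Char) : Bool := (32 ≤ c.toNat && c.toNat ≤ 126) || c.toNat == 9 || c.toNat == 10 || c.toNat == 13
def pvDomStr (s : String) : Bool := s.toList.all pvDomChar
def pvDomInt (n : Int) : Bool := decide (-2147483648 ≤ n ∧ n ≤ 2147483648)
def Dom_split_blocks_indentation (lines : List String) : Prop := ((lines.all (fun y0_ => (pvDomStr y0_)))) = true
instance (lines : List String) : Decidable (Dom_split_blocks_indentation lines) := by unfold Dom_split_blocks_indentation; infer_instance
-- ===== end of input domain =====

-- B replaces A's per-line accumulator loop by an index-jumping two-level scan: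
-- an inner while finds the index of the next header line and the block is the
-- slice lines[i:n] taken in one step; objective: alternative decomposition,
-- same cost.

-- `line and line[0] != ' '` — Python truthiness of a string plus its first char
def sbiIsHeader (line : String) : Bool :=
  match line.toList with
  | [] => false
  | c :: _ => decide (c ≠ ' ')

-- ===== PORT A =====
-- A's loop: state (blocks, block); flush `block` on each header and at the end.
def sbiLoop (blocks : List String) (block : List String) : List String → List String
  | [] => if block = [] then blocks else blocks ++ [PySem.Str.join "\n" block]
  | line :: rest =>
    if sbiIsHeader line then
      sbiLoop (if block = [] then blocks else blocks ++ [PySem.Str.join "\n" block]) [line] rest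
    else
      sbiLoop blocks (block ++ [line]) rest

def split_blocks_indentation (lines : List String) : List String :=
  sbiLoop [] [] lines

-- ===== PORT B =====
-- Source B's inner `while n < len(lines) and not (lines[n] and lines[n][0] != ' ')`
def sbiAdvance (lines : List String) (n : Nat) : Nat :=
  if h : n < lines.length then
    if sbiIsHeader lines[n] then n else sbiAdvance lines (n + 1)
  else n
termination_by lines.length - n

-- the inner while never moves `n` backwards (needed for the outer loop's termination)
theorem sbiAdvance_le (lines : List String) : ∀ n, n ≤ sbiAdvance lines n := by
  intro n
  fun_induction sbiAdvance lines n with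
  | case1 => omega
  | case2 _ _ _ ih => omega
  | case3 => omega

-- Source B's outer `while i < len(lines)` loop; `lines[i:n]` is a PySem slice.
def sbiOuter (lines : List String) (blocks : List String) (i : Nat) : List String :=
  if _h : i < lines.length then
    let n := sbiAdvance lines (i + 1)
    sbiOuter lines
      (blocks ++ [PySem.Str.join "\n"
        (PySem.List.slice lines (some (i : Int)) (some (n : Int)))]) n
  else blocks
termination_by lines.length - i
decreasing_by
  have := sbiAdvance_le lines (i + 1)
  omega

def split_blocks_indentation_alt (lines : List String) : List String :=
  sbiOuter lines [] 0

-- ===== PRECONDITION & SPEC =====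
def Spec_split_blocks_indentation (lines : List String) (out : List String) : Prop := out = split_blocks_indentation_alt lines
instance (lines : List String) (out : List String) : Decidable (Spec_split_blocks_indentation lines out) := by unfold Spec_split_blocks_indentation; infer_instance

-- ===== CLAIM (what is proved, stated in full; the proofs are below) =====
def Claim_equal_split_blocks_indentation : Prop := ∀ (lines : List String), Dom_split_blocks_indentation lines → Spec_split_blocks_indentation lines (split_blocks_indentation lines)

-- ===== LEMMAS AND PROOFS =====

-- Canonical grouping of the lines into blocks (proof-side middle ground):
-- a break falls exactly before each header line.
def sbiGroups : List String → List (List String)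
  | [] => []
  | line :: rest =>
    match sbiGroups rest with
    | [] => [[line]]
    | g0 :: gs => if sbiIsHeader g0.headI then [line] :: g0 :: gs else (line :: g0) :: gs

def sbiStep (line : String) : List (List String) → List (List String)
  | [] => [[line]]
  | g0 :: gs => if sbiIsHeader g0.headI then [line] :: g0 :: gs else (line :: g0) :: gs

theorem sbiGroups_cons (line : String) (rest : List String) :
    sbiGroups (line :: rest) = sbiStep line (sbiGroups rest) := rfl

-- === A-side: sbiLoop computes the joined canonical groups ===

-- How a pending partial block of A combines with the groups of the remaining lines.
def sbiMerge (block : List String) : List (List String) → List (List String)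
  | [] => if block = [] then [] else [block]
  | g0 :: gs => if sbiIsHeader g0.headI then (if block = [] then g0 :: gs else block :: g0 :: gs)
                else (block ++ g0) :: gs

theorem sbiMerge_step_header (block : List String) (line : String)
    (hl : sbiIsHeader line = true) (gs : List (List String)) :
    sbiMerge block (sbiStep line gs)
      = (if block = [] then [] else [block]) ++ sbiMerge [line] gs := by
  cases gs with
  | nil => simp [sbiStep, sbiMerge, hl]; split <;> simp
  | cons g0 gs' =>
    by_cases hg0 : sbiIsHeader g0.headI = true <;>
      · simp [sbiStep, sbiMerge, hg0, List.headI_cons, hl]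
        split <;> simp

theorem sbiMerge_step_cont (block : List String) (line : String)
    (hl : sbiIsHeader line = false) (gs : List (List String)) :
    sbiMerge block (sbiStep line gs) = sbiMerge (block ++ [line]) gs := by
  cases gs with
  | nil => simp [sbiStep, sbiMerge, hl]
  | cons g0 gs' =>
    by_cases hg0 : sbiIsHeader g0.headI = true <;>
      simp [sbiStep, sbiMerge, hg0, List.headI_cons, hl]

theorem sbiLoop_eq (lines : List String) : ∀ (blocks block : List String),
    sbiLoop blocks block lines
      = blocks ++ (sbiMerge block (sbiGroups lines)).map (fun g => PySem.Str.join "\n" g) := by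
  induction lines with
  | nil =>
    intro blocks block
    simp only [sbiLoop, sbiGroups, sbiMerge]
    split <;> simp
  | cons line rest ih =>
    intro blocks block
    rw [sbiGroups_cons]
    by_cases hl : sbiIsHeader line = true
    · rw [show sbiLoop blocks block (line :: rest)
          = sbiLoop (if block = [] then blocks else blocks ++ [PySem.Str.join "\n" block]) [line] rest
          from by simp [sbiLoop, hl], ih, sbiMerge_step_header block line hl]
      split <;> simp
    · rw [show sbiLoop blocks block (line :: rest)
          = sbiLoop blocks (block ++ [line]) rest
          from by simp [sbiLoop, hl], ih,
        sbiMerge_step_cont block line (by simpa using hl)]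

theorem portA_eq_groups (lines : List String) :
    split_blocks_indentation lines
      = (sbiGroups lines).map (fun g => PySem.Str.join "\n" g) := by
  unfold split_blocks_indentation
  rw [sbiLoop_eq]
  cases hg : sbiGroups lines with
  | nil => simp [sbiMerge]
  | cons g0 gs =>
    by_cases hg0 : sbiIsHeader g0.headI = true <;> simp [sbiMerge, hg0]

-- === B-side: sbiOuter computes the joined canonical groups ===

-- the first group of sbiGroups starts with the first line
theorem sbiGroups_head (l : String) (r : List String) :
    ∃ g gs, sbiGroups (l :: r) = (l :: g) :: gs := by
  rw [sbiGroups_cons]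
  cases sbiGroups r with
  | nil => exact ⟨[], [], rfl⟩
  | cons g0 gs =>
    by_cases hg0 : sbiIsHeader g0.headI = true
    · exact ⟨[], g0 :: gs, by simp [sbiStep, hg0]⟩
    · exact ⟨g0, gs, by simp [sbiStep, hg0]⟩

-- a run of non-headers after any first line, up to the next header, is one group
theorem sbiGroups_split (run : List String) (hrun : ∀ s ∈ run, sbiIsHeader s = false)
    (rest : List String) (hrest : ∀ h t, rest = h :: t → sbiIsHeader h = true) :
    ∀ x, sbiGroups (x :: (run ++ rest)) = (x :: run) :: sbiGroups rest := by
  induction run with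
  | nil =>
    intro x
    cases rest with
    | nil => rfl
    | cons h t =>
      obtain ⟨g, gs, hg⟩ := sbiGroups_head h t
      have hh := hrest h t rfl
      simp only [List.nil_append, sbiGroups_cons, hg, sbiStep, List.headI_cons, hh]
      simp
  | cons y run' ih =>
    intro x
    have hy : sbiIsHeader y = false := hrun y (by simp)
    have ih' := ih (fun s hs => hrun s (List.mem_cons_of_mem _ hs)) y
    rw [List.cons_append, sbiGroups_cons, ih', sbiStep, List.headI_cons, hy]
    simp

-- the inner while lands exactly past the leading run of non-headers
theorem sbiAdvance_spec (xs : List String) : ∀ (ys : List String),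
    sbiAdvance (ys ++ xs) ys.length
      = ys.length + (xs.takeWhile (fun l => !sbiIsHeader l)).length := by
  induction xs with
  | nil =>
    intro ys
    rw [sbiAdvance]
    simp
  | cons a xs' ih =>
    intro ys
    rw [sbiAdvance]
    have hlen : ys.length < (ys ++ a :: xs').length := by simp
    have hget : (ys ++ a :: xs')[ys.length]'hlen = a := by
      simp
    rw [dif_pos hlen, hget]
    by_cases ha : sbiIsHeader a = true
    · simp [ha]
    · have hb : sbiIsHeader a = false := by simpa using ha
      have := ih (ys ++ [a])
      simp only [List.append_assoc, List.cons_append, List.nil_append,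
        List.length_append, List.length_cons, List.length_nil] at this
      rw [hb]
      simp only [Bool.false_eq_true, if_false]
      rw [show ys.length + 1 = (ys ++ [a]).length by simp,
        show ys ++ a :: xs' = (ys ++ [a]) ++ xs' by simp]
      rw [ih (ys ++ [a])]
      simp [hb]
      omega

-- the head of dropWhile (if any) fails the predicate
theorem dropWhile_head_false {α : Type} (p : α → Bool) (xs : List α) :
    ∀ h t, xs.dropWhile p = h :: t → p h = false := by
  induction xs with
  | nil => intro h t hx; simp [List.dropWhile] at hx
  | cons a xs' ih =>
    intro h t hx
    rw [List.dropWhile_cons] at hx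
    by_cases ha : p a = true
    · exact ih h t (by simpa [ha] using hx)
    · have : a = h := by simp [ha] at hx; exact hx.1
      subst this; simpa using ha

theorem sbiOuter_eq (lines : List String) : ∀ (fuel i : Nat) (blocks : List String),
    lines.length - i ≤ fuel →
    sbiOuter lines blocks i
      = blocks ++ (sbiGroups (lines.drop i)).map (fun g => PySem.Str.join "\n" g) := by
  intro fuel
  induction fuel with
  | zero =>
    intro i blocks hf
    have hge : lines.length ≤ i := by omega
    rw [sbiOuter, dif_neg (by omega)]
    simp [List.drop_eq_nil_of_le hge, sbiGroups]
  | succ fuel ih =>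
    intro i blocks hf
    by_cases h : i < lines.length
    · -- drop i lines = x :: xs
      obtain ⟨x, xs, hdrop⟩ : ∃ x xs, lines.drop i = x :: xs := by
        cases hd : lines.drop i with
        | nil => exact absurd (List.drop_eq_nil_iff.mp hd) (by omega)
        | cons x xs => exact ⟨x, xs, rfl⟩
      have hxs : lines.drop (i + 1) = xs := by
        rw [← List.tail_drop, hdrop]; rfl
      set tw := xs.takeWhile (fun l => !sbiIsHeader l) with htw
      set dw := xs.dropWhile (fun l => !sbiIsHeader l) with hdw
      have hsplit : xs = tw ++ dw := (List.takeWhile_append_dropWhile).symm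
      -- the value of the inner while
      have hi1 : i + 1 ≤ lines.length := by omega
      have hdecomp : lines = lines.take (i + 1) ++ lines.drop (i + 1) :=
        (List.take_append_drop _ _).symm
      have hlen1 : (lines.take (i + 1)).length = i + 1 := by
        simp [List.length_take]; omega
      have hadv : sbiAdvance lines (i + 1) = i + 1 + tw.length := by
        have h0 := sbiAdvance_spec xs (lines.take (i + 1))
        rw [hlen1] at h0
        rw [show lines.take (i + 1) ++ xs = lines from by
          rw [← hxs, List.take_append_drop]] at h0
        rw [htw]
        exact h0
      rw [sbiOuter, dif_pos h]
      set n := sbiAdvance lines (i + 1) with hn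
      -- the slice is x :: tw
      have hslice : PySem.List.slice lines (some (i : Int)) (some (n : Int))
          = x :: tw := by
        rw [PySem.List.slice_natCast, hdrop, hadv]
        rw [show i + 1 + tw.length - i = tw.length + 1 by omega]
        rw [List.take_succ_cons]
        congr 1
        rw [hsplit, List.take_left]
      -- the remaining suffix
      have hdropn : lines.drop n = dw := by
        rw [hadv, ← List.drop_drop, hxs, hsplit, List.drop_left]
      -- groups split at the header boundary
      have hgrp : sbiGroups (lines.drop i) = (x :: tw) :: sbiGroups dw := by
        rw [hdrop, hsplit]
        refine sbiGroups_split tw ?_ dw ?_ x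
        · intro s hs
          have := List.mem_takeWhile_imp hs
          simpa using this
        · intro hh t ht
          have := dropWhile_head_false (fun l => !sbiIsHeader l) xs hh t ht
          simpa using this
      have hfuel : lines.length - n ≤ fuel := by
        have := sbiAdvance_le lines (i + 1)
        omega
      rw [ih n _ hfuel, hdropn, hgrp, hslice]
      simp
    · rw [sbiOuter, dif_neg h]
      have hnil : lines.drop i = [] := List.drop_eq_nil_of_le (by omega)
      rw [hnil]
      simp [sbiGroups]

theorem portB_eq_groups (lines : List String) :
    split_blocks_indentation_alt lines
      = (sbiGroups lines).map (fun g => PySem.Str.join "\n" g) := by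
  unfold split_blocks_indentation_alt
  rw [sbiOuter_eq lines lines.length 0 [] (by omega)]
  simp

-- ===== VERDICT (by name: the statement is the Claim_ definition above) =====
theorem split_blocks_indentation_spec : Claim_equal_split_blocks_indentation := by
  intro lines _
  unfold Spec_split_blocks_indentation
  rw [portA_eq_groups, portB_eq_groups]
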